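-- pv_equiv track=rewrite | github.com/altermarkive/training | algorithms/code/hackerrank/most_commons/test_most_commons.py | mangle
-- ===== SOURCE A (Python) =====
-- import collections
--
-- def mangle(s: str) -> tuple[list[str], dict[str, int]]:
--     counted: collections.Counter = collections.Counter()
--     for entry in s:
--         counted[entry] += 1
--     ordered = sorted(
--         counted.keys(),
--         key=lambda key: (counted[key] << 8) | (256 - ord(key)),
--         reverse=True,
--     )
--     return ordered, counted
-- ===== SOURCE B (Python) =====
-- import collections
--
--
-- def mangle(s: str) -> tuple[list[str], dict[str, int]]:
--     counted = collections.Counter(s)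
--     buckets: dict = {}
--     for ch in sorted(counted):
--         buckets.setdefault(counted[ch], []).append(ch)
--     ordered: list = []
--     for c in range(len(s), 0, -1):
--         ordered.extend(buckets.get(c, []))
--     return ordered, counted
-- ===== Notes on version B (the rewrite author's own statement) =====
-- stated objective: alternative
-- what changed: B replaces A's reverse sort of the distinct characters under the composite bit-packed key ((count<<8)|(256-ord)) by a bucket (counting-sort) pass: the distinct characters are taken in ascending order, appended to per-count buckets, and the buckets are concatenated for counts len(s) down to 1.
import Mathlib
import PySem

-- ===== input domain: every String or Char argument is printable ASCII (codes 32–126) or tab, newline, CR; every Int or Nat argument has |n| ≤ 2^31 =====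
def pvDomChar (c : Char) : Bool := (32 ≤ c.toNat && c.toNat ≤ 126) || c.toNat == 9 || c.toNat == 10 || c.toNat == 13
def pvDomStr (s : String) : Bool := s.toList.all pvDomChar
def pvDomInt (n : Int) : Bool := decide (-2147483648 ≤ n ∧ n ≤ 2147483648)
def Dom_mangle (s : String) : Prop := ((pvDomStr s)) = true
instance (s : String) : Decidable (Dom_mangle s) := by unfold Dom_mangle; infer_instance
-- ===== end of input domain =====

-- B replaces A's composite-key sort of the distinct characters by a bucket pass:
-- characters in ascending order are appended to per-count buckets, which are then
-- emitted for counts len(s) down to 1 (same return value, proved below).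

-- ===== PORT A =====
-- ord(key) for a key produced by iterating a Python string (always a 1-char string)
def pyOrdKey (k : String) : Int :=
  match k.toList with
  | [c] => (c.toNat : Int)
  | _ => 0

def mangle (s : String) : List String × (List (String × Int)) :=
  let counted := (s.toList.map (fun c => String.ofList [c])).foldl
      (fun d x => d.modify x (0 : Int) (· + 1)) PySem.Dict.empty
  let ordered := PySem.List.sorted counted.keys
      (fun key => PySem.Int.bor ((counted.getD key 0) <<< (8 : Nat)) (256 - pyOrdKey key)) true
  (ordered, counted.items)

-- ===== PORT B =====
def mangle_alt (s : String) : List String × (List (String × Int)) :=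
  let counted := PySem.Dict.counter (s.toList.map (fun c => String.ofList [c]))
  let buckets := (PySem.List.sorted counted.keys (fun k => k) false).foldl
      (fun b ch => b.modify (counted.getD ch 0) [] (· ++ [ch]))
      (PySem.Dict.empty : PySem.Dict Int (List String))
  let ordered := (PySem.List.pyRange (PySem.Str.len s) 0 (-1)).foldl
      (fun acc c => acc ++ buckets.getD c []) ([] : List String)
  (ordered, counted.items)

-- ===== PRECONDITION & SPEC =====
def Spec_mangle (s : String) (out : List String × (List (String × Int))) : Prop := out = mangle_alt s
instance (s : String) (out : List String × (List (String × Int))) : Decidable (Spec_mangle s out) := by unfold Spec_mangle; infer_instance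

-- ===== CLAIM (what is proved, stated in full; the proofs are below) =====
def Claim_equal_mangle : Prop := ∀ (s : String), Dom_mangle s → Spec_mangle s (mangle s)

-- ===== LEMMAS AND PROOFS =====

theorem lor_shift (m r : Nat) (h : r < 256) : (m <<< 8) ||| r = m * 256 + r := by
  have hq : ((m <<< 8) ||| r) / 256 = m := by
    have : ((m <<< 8) ||| r) >>> 8 = m := by
      rw [Nat.shiftRight_or_distrib, Nat.shiftLeft_shiftRight, Nat.shiftRight_eq_div_pow]
      have hr : r / 2 ^ 8 = 0 := Nat.div_eq_of_lt h
      rw [hr]; simp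
    rw [Nat.shiftRight_eq_div_pow] at this; norm_num at this; exact this
  have hm : ((m <<< 8) ||| r) % 256 = r := by
    have h256 : (256 : Nat) = 2 ^ 8 := by norm_num
    rw [h256, ← Nat.and_two_pow_sub_one_eq_mod, Nat.and_or_distrib_right]
    have h1 : (m <<< 8) &&& (2 ^ 8 - 1) = 0 := by
      rw [Nat.shiftLeft_eq, Nat.and_two_pow_sub_one_eq_mod, Nat.mul_mod_left]
    rw [h1, Nat.and_two_pow_sub_one_eq_mod, Nat.mod_eq_of_lt (by omega)]
    simp
  have := Nat.div_add_mod ((m <<< 8) ||| r) 256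
  omega

-- the sort key of port A, in closed arithmetic form
theorem kf_closed (n : Nat) (o : Int) (h9 : 9 ≤ o) (h126 : o ≤ 126) :
    PySem.Int.bor ((n : Int) <<< (8 : Nat)) (256 - o) = 256 * n + (256 - o) := by
  have h1 : ((n : Int) <<< (8 : Nat)) = ((n <<< 8 : Nat) : Int) := rfl
  rw [h1, PySem.Int.bor_of_nonneg (by positivity) (by omega), Int.toNat_natCast,
    lor_shift _ _ (by omega)]
  push_cast [Int.toNat_of_nonneg (by omega : (0:Int) ≤ 256 - o)]
  ring

-- single-character strings compare like their character codes
theorem mk_lt_mk (c d : Char) : (String.ofList [c] < String.ofList [d]) ↔ c.toNat < d.toNat := by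
  rw [String.lt_iff_toList_lt]
  simp only [String.toList_ofList, List.cons_lt_cons_iff]
  constructor
  · rintro (h | ⟨rfl, h⟩)
    · exact UInt32.lt_iff_toNat_lt.mp (Char.lt_def.mp h)
    · simp at h
  · intro h
    exact Or.inl (Char.lt_def.mpr (UInt32.lt_iff_toNat_lt.mpr h))

-- partitioning a list by its value under f, over distinct values, is a permutation
theorem flatMap_filter_perm {α : Type} (f : α → Int) :
    ∀ (cs : List Int) (l : List α), cs.Nodup → (∀ x ∈ l, f x ∈ cs) →
      (cs.flatMap (fun c => l.filter (fun x => f x == c))).Perm l := by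
  intro cs
  induction cs with
  | nil =>
    intro l _ hmem
    have : l = [] := List.eq_nil_iff_forall_not_mem.mpr (fun x hx => by simpa using hmem x hx)
    simp [this]
  | cons c cs ih =>
    intro l hnd hmem
    rw [List.flatMap_cons]
    have hcn : c ∉ cs := (List.nodup_cons.mp hnd).1
    have hstep : ∀ c' ∈ cs, l.filter (fun x => f x == c') =
        (l.filter (fun x => !(f x == c))).filter (fun x => f x == c') := by
      intro c' hc'
      rw [List.filter_filter]
      apply List.filter_congr
      intro x _
      by_cases heq : f x = c'
      · have hne : ¬ c' = c := fun h => hcn (h ▸ hc')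
        simp [heq, hne]
      · simp [heq]
    have hfm : cs.flatMap (fun c' => l.filter (fun x => f x == c')) =
        cs.flatMap (fun c' => (l.filter (fun x => !(f x == c))).filter (fun x => f x == c')) := by
      apply List.flatMap_congr
      exact hstep
    rw [hfm]
    have ih' := ih (l.filter (fun x => !(f x == c))) (List.nodup_cons.mp hnd).2 ?_
    · exact (List.Perm.append_left _ ih').trans (List.filter_append_perm _ l)
    · intro x hx
      rw [List.mem_filter] at hx
      have := hmem x hx.1
      simp only [List.mem_cons] at this
      rcases this with h | h
      · simp [h] at hx
      · exact h

-- the bucket concatenation is strictly decreasing under the composite key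
theorem flatMap_filter_pairwise {α : Type} (f kf : α → Int) (l : List α)
    (hl : l.Pairwise (fun a b => f a = f b → kf b < kf a))
    (hcross : ∀ a ∈ l, ∀ b ∈ l, f b < f a → kf b < kf a) :
    ∀ cs : List Int, cs.Pairwise (fun a b => b < a) →
      (cs.flatMap (fun c => l.filter (fun x => f x == c))).Pairwise (fun a b => kf b < kf a) := by
  intro cs
  induction cs with
  | nil => intro _; simp
  | cons c cs ih =>
    intro hcs
    rw [List.flatMap_cons, List.pairwise_append]
    refine ⟨?_, ih (List.Pairwise.sublist (List.sublist_cons_self c cs) hcs), ?_⟩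
    · have hf := hl.filter (fun x => f x == c)
      refine hf.imp_of_mem ?_
      intro a b ha hb h
      rw [List.mem_filter] at ha hb
      exact h (by have := ha.2; have := hb.2; simp at *; omega)
    · intro a ha b hb
      rw [List.mem_filter] at ha
      rw [List.mem_flatMap] at hb
      obtain ⟨c', hc', hb'⟩ := hb
      rw [List.mem_filter] at hb'
      have hlt : c' < c := (List.pairwise_cons.mp hcs).1 c' hc'
      apply hcross a ha.1 b hb'.1
      have h1 : f a = c := by simpa using ha.2
      have h2 : f b = c' := by simpa using hb'.2
      omega

-- ===== VERDICT (by name: the statement is the Claim_ definition above) =====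
theorem mangle_spec : Claim_equal_mangle := by
  intro s hs
  unfold Spec_mangle mangle mangle_alt
  simp only []
  set chars := s.toList.map (fun c => String.ofList [c]) with hchars
  have hctr : chars.foldl (fun d x => d.modify x (0 : Int) (· + 1)) PySem.Dict.empty
      = PySem.Dict.counter chars := rfl
  rw [hctr]
  set ctr := PySem.Dict.counter chars with hctrdef
  set f : String → Int := fun ch => ctr.getD ch 0 with hf
  set kfA : String → Int := fun key => PySem.Int.bor ((ctr.getD key 0) <<< (8 : Nat)) (256 - pyOrdKey key) with hkfA
  set sortedKeys := PySem.List.sorted ctr.keys (fun k => k) false with hsk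
  set n : Int := PySem.Str.len s with hn
  refine Prod.ext ?_ rfl
  simp only []
  -- rewrite B's fold into a flatMap of bucket contents
  rw [PySem.List.foldl_append_eq_flatMap, List.nil_append]
  -- bucket contents: getD of the grouping fold is a filter of sortedKeys
  have hbucket : ∀ c : Int,
      (sortedKeys.foldl (fun b ch => b.modify (ctr.getD ch 0) [] (· ++ [ch]))
        (PySem.Dict.empty : PySem.Dict Int (List String))).getD c []
      = sortedKeys.filter (fun x => f x == c) := by
    intro c
    have hm : sortedKeys.foldl (fun b ch => b.modify (ctr.getD ch 0) [] (· ++ [ch]))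
        (PySem.Dict.empty : PySem.Dict Int (List String))
        = (sortedKeys.map (fun ch => (ctr.getD ch 0, ch))).foldl
            (fun d p => d.modify p.1 [] (· ++ [p.2])) PySem.Dict.empty := by
      rw [List.foldl_map]
    rw [hm, PySem.Dict.getD_foldl_modify_append, List.filter_map, List.map_map]
    simp [Function.comp_def, hf]
  simp only [hbucket]
  -- domain facts
  have hdom : ∀ k ∈ chars, ∃ c : Char, k = String.ofList [c] ∧ 9 ≤ (c.toNat : Int) ∧ (c.toNat : Int) ≤ 126 := by
    intro k hk
    rw [hchars, List.mem_map] at hk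
    obtain ⟨c, hc, rfl⟩ := hk
    refine ⟨c, rfl, ?_⟩
    have := (List.all_eq_true.mp hs) c hc
    simp only [pvDomChar, Bool.or_eq_true, Bool.and_eq_true, decide_eq_true_eq, beq_iff_eq] at this
    omega
  have hord : ∀ k ∈ chars, 9 ≤ pyOrdKey k ∧ pyOrdKey k ≤ 126 := by
    intro k hk
    obtain ⟨c, rfl, h1, h2⟩ := hdom k hk
    have hpo : pyOrdKey (String.ofList [c]) = (c.toNat : Int) := by simp [pyOrdKey]
    rw [hpo]; omega
  have hcount : ∀ k, f k = ((chars.count k : Nat) : Int) := by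
    intro k; simp [hf, hctrdef, PySem.Dict.getD_counter]
  have hkf : ∀ k ∈ chars, kfA k = 256 * ((chars.count k : Nat) : Int) + (256 - pyOrdKey k) := by
    intro k hk
    obtain ⟨h9, h126⟩ := hord k hk
    have : ctr.getD k 0 = ((chars.count k : Nat) : Int) := hcount k
    rw [hkfA]
    simp only [this]
    exact kf_closed _ _ h9 h126
  have hmono : ∀ k ∈ chars, ∀ k' ∈ chars, k < k' → pyOrdKey k < pyOrdKey k' := by
    intro k hk k' hk' hlt
    obtain ⟨c, rfl, _, _⟩ := hdom k hk
    obtain ⟨d, rfl, _, _⟩ := hdom k' hk'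
    have := (mk_lt_mk c d).mp hlt
    simp [pyOrdKey]
    omega
  have hmemchars : ∀ x ∈ sortedKeys, x ∈ chars := by
    intro x hx
    rw [hsk, PySem.List.mem_sorted, hctrdef, PySem.Dict.keys_counter] at hx
    exact (PySem.Set.mem_ofList _ _).mp hx
  -- the bucket concatenation is exactly A's reverse-sorted key list
  apply PySem.List.sorted_rev_eq_of_perm_of_pairwise_gt
  · -- permutation
    refine (flatMap_filter_perm f _ _ ?_ ?_).trans (PySem.List.sorted_perm _ _ _)
    · -- nodup of the countdown range
      have hp : (PySem.List.pyRange n 0 (-1)).Pairwise (fun a b => b < a) := by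
        rw [PySem.List.pyRange_neg_one_eq_reverse, List.pairwise_reverse]
        exact PySem.List.pairwise_lt_pyRange_one 1 (n + 1)
      exact hp.imp (fun h => ne_of_gt h)
    · intro x hx
      have hxc := hmemchars x hx
      rw [PySem.List.mem_pyRange_neg_one]
      have h1 : 0 < chars.count x := List.count_pos_iff.mpr hxc
      have h2 : chars.count x ≤ chars.length := List.count_le_length
      have h3 : n = (chars.length : Int) := by
        rw [hn, PySem.Str.len_eq, hchars, List.length_map]
      rw [hcount x, h3]
      omega
  · -- pairwise strictly decreasing key
    apply flatMap_filter_pairwise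
    · -- within a bucket: ascending characters with equal counts
      have hpl : sortedKeys.Pairwise (· < ·) := by
        rw [hsk, hctrdef, PySem.Dict.keys_counter]
        exact PySem.List.sorted_ofList_pairwise_lt chars
      refine hpl.imp_of_mem ?_
      intro a b ha hb hab hfab
      have hac := hmemchars a ha
      have hbc := hmemchars b hb
      rw [hkf a hac, hkf b hbc]
      have := hmono a hac b hbc hab
      have hcc : ((chars.count a : Nat) : Int) = ((chars.count b : Nat) : Int) := by
        rw [← hcount a, ← hcount b, hfab]
      omega
    · -- across buckets: a strictly larger count dominates the key
      intro a ha b hb hba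
      have hac := hmemchars a ha
      have hbc := hmemchars b hb
      rw [hkf a hac, hkf b hbc]
      rw [hcount a, hcount b] at hba
      obtain ⟨h9a, h126a⟩ := hord a hac
      obtain ⟨h9b, h126b⟩ := hord b hbc
      omega
    · -- the countdown range is strictly decreasing
      rw [PySem.List.pyRange_neg_one_eq_reverse, List.pairwise_reverse]
      exact PySem.List.pairwise_lt_pyRange_one 1 (n + 1)
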